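-- pv_equiv track=rewrite | github.com/djeada/Nauka-Programowania | src/Python/24_Listy_trudne/Zad1.py | znajdzZeroDoPodmianyV1
-- ===== SOURCE A (Python) =====
-- def znajdzZeroDoPodmianyV1(lista):
--     licznikJedynek = 0
--     indeksZera = -1
--
--     licznikZer = 0
--     poprzedniIndeksZera = -1
--
--     for i in range(len(lista)):
--
--         if lista[i] == 1:
--             licznikZer += 1
--
--         else:
--             licznikZer = i - poprzedniIndeksZera
--             poprzedniIndeksZera = i
--
--         if licznikZer > licznikJedynek:
--             licznikJedynek = licznikZer
--             indeksZera = poprzedniIndeksZera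
--
--     return indeksZera
-- ===== SOURCE B (Python) =====
-- def znajdzZeroDoPodmianyV1(lista):
--     # Collect indices of replaceable elements (anything != 1), then score each
--     # zero z between its neighbour zeros p and nx (sentinels -1 and len) as
--     # nx - p - 1; strict '>' keeps the earliest zero on ties.
--     zera = [i for i, x in enumerate(lista) if x != 1]
--     if not zera:
--         return -1
--     granice = [-1] + zera + [len(lista)]
--     best_dl = 0
--     best_z = -1
--     for p, z, nx in zip(granice, granice[1:], granice[2:]):
--         dl = nx - p - 1
--         if dl > best_dl:
--             best_dl = dl
--             best_z = z
--     return best_z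
-- ===== Notes on version B (the rewrite author's own statement) =====
-- stated objective: alternative
-- what changed: Instead of A's incremental per-index scan carrying a running window counter, B first collects the indices of all non-1 elements and then makes one pass over consecutive zero triples (prev, z, next) with sentinels -1 and len(lista), scoring each zero as next - prev - 1.
import Mathlib
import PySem

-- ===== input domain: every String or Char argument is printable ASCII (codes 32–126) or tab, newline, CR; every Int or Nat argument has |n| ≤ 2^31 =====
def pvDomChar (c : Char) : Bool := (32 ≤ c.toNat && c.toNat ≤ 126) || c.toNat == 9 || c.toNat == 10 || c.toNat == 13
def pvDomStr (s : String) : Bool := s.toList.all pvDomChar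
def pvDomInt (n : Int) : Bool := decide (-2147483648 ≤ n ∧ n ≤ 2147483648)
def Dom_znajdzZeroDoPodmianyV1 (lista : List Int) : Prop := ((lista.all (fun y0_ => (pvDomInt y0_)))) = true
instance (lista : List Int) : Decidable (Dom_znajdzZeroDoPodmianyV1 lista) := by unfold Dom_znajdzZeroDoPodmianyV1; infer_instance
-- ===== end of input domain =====

-- B replaces A's incremental window scan by collecting the non-1 indices and scoring each
-- zero from its neighbour zeros with sentinels (alternative decomposition, same cost).


-- ===== PORT A =====
-- state = (licznikJedynek, indeksZera, licznikZer, poprzedniIndeksZera)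
def pvStepA (lista : List Int) (st : Int × Int × Int × Int) (i : Int) : Int × Int × Int × Int :=
  let cp := if PySem.List.pyGetD lista i 0 = 1 then (st.2.2.1 + 1, st.2.2.2) else (i - st.2.2.2, i)
  if cp.1 > st.1 then (cp.1, cp.2, cp.1, cp.2) else (st.1, st.2.1, cp.1, cp.2)

def znajdzZeroDoPodmianyV1 (lista : List Int) : Int :=
  ((PySem.List.pyRange 0 (PySem.List.len lista) 1).foldl (pvStepA lista) (0, -1, 0, -1)).2.1

-- ===== PORT B =====
-- [i for i, x in enumerate(lista) if x != 1]  (index counter carried explicitly)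
def pvZera : List Int → Int → List Int
  | [], _ => []
  | x :: xs, i => if x ≠ 1 then i :: pvZera xs (i + 1) else pvZera xs (i + 1)

-- loop body over one (p, z, nx) triple; state = (best_dl, best_z)
def pvStepB (st : Int × Int) (t : (Int × Int) × Int) : Int × Int :=
  let dl := t.2 - t.1.1 - 1
  if dl > st.1 then (dl, t.1.2) else st

-- the for-loop over zip(granice, granice[1:], granice[2:])
def pvPetla (granice : List Int) : Int :=
  (((granice.zip (granice.drop 1)).zip (granice.drop 2)).foldl pvStepB (0, -1)).2

def znajdzZeroDoPodmianyV1_alt (lista : List Int) : Int :=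
  if (pvZera lista 0).isEmpty then -1
  else pvPetla (-1 :: (pvZera lista 0 ++ [PySem.List.len lista]))

-- ===== PRECONDITION & SPEC =====
def Spec_znajdzZeroDoPodmianyV1 (lista : List Int) (out : Int) : Prop := out = znajdzZeroDoPodmianyV1_alt lista
instance (lista : List Int) (out : Int) : Decidable (Spec_znajdzZeroDoPodmianyV1 lista out) := by unfold Spec_znajdzZeroDoPodmianyV1; infer_instance

-- ===== CLAIM (what is proved, stated in full; the proofs are below) =====
def Claim_equal_znajdzZeroDoPodmianyV1 : Prop := ∀ (lista : List Int), Dom_znajdzZeroDoPodmianyV1 lista → Spec_znajdzZeroDoPodmianyV1 lista (znajdzZeroDoPodmianyV1 lista)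

-- ===== LEMMAS AND PROOFS =====

-- A's loop re-expressed as structural recursion over the remaining suffix.
def pvAgo : List Int → Int → Int × Int × Int × Int → Int × Int × Int × Int
  | [], _, st => st
  | x :: xs, i, st =>
    let cp := if x = 1 then (st.2.2.1 + 1, st.2.2.2) else (i - st.2.2.2, i)
    pvAgo xs (i + 1) (if cp.1 > st.1 then (cp.1, cp.2, cp.1, cp.2) else (st.1, st.2.1, cp.1, cp.2))

-- B's triple loop re-expressed as recursion over the zero list carrying prev.
def pvAltGo (n : Int) : Int → List Int → Int × Int → Int × Int
  | _, [], best => best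
  | prev, z :: zs, best =>
    let nxt := match zs with | [] => n | w :: _ => w
    let dl := nxt - prev - 1
    pvAltGo n z zs (if dl > best.1 then (dl, z) else best)

lemma pvAgo_bridge : ∀ (suf pre : List Int) (st : Int × Int × Int × Int),
    (PySem.List.pyRange (pre.length : Int) ((pre.length : Int) + suf.length) 1).foldl
      (pvStepA (pre ++ suf)) st = pvAgo suf (pre.length : Int) st := by
  intro suf
  induction suf with
  | nil =>
    intro pre st
    rw [show ((pre.length : Int) + (([] : List Int).length : Int)) = (pre.length : Int) by simp,
      PySem.List.pyRange_one_eq_nil le_rfl]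
    simp [pvAgo]
  | cons x xs ih =>
    intro pre st
    have hlt : (pre.length : Int) < (pre.length : Int) + ((x :: xs).length : Int) := by
      simp only [List.length_cons]
      push_cast; omega
    rw [PySem.List.pyRange_one_cons hlt, List.foldl_cons]
    have hget : PySem.List.pyGetD (pre ++ x :: xs) (pre.length : Int) 0 = x := by
      rw [PySem.List.pyGetD_natCast]
      simp [List.getD]
    have harr : (pre.length : Int) + ((x :: xs).length : Int)
        = (((pre ++ [x]).length : Nat) : Int) + ((xs.length : Nat) : Int) := by
      push_cast [List.length_append, List.length_cons, List.length_nil]; ring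
    have hpre1 : (((pre ++ [x]).length : Nat) : Int) = (pre.length : Int) + 1 := by
      push_cast [List.length_append, List.length_cons, List.length_nil]; ring
    rw [show pre ++ x :: xs = (pre ++ [x]) ++ xs from by simp, harr, ← hpre1,
      ih (pre ++ [x]), hpre1]
    show pvAgo xs ((pre.length : Int) + 1) _ = pvAgo (x :: xs) (pre.length : Int) st
    rw [show (pre ++ [x]) ++ xs = pre ++ x :: xs from by simp]
    simp only [pvAgo, pvStepA, hget]

lemma pvAgo_ones : ∀ (os rest : List Int) (i maxv idx cnt prev : Int),
    (∀ y ∈ os, y = 1) → cnt ≤ maxv →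
    pvAgo (os ++ rest) i (maxv, idx, cnt, prev)
      = pvAgo rest (i + os.length)
          (max maxv (cnt + os.length),
           if cnt + (os.length : Int) > maxv then prev else idx,
           cnt + os.length, prev) := by
  intro os
  induction os with
  | nil =>
    intro rest i maxv idx cnt prev _ hcnt
    simp only [List.nil_append, List.length_nil, Nat.cast_zero, add_zero]
    rw [if_neg (by omega), max_eq_left (by omega)]
  | cons y ys ih =>
    intro rest i maxv idx cnt prev h hcnt
    have hy : y = 1 := h y (by simp)
    subst hy
    rw [show ((1 : Int) :: ys) ++ rest = (1 : Int) :: (ys ++ rest) from rfl]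
    have hstep : pvAgo ((1 : Int) :: (ys ++ rest)) i (maxv, idx, cnt, prev)
        = pvAgo (ys ++ rest) (i + 1)
            (max maxv (cnt + 1), if cnt + 1 > maxv then prev else idx, cnt + 1, prev) := by
      rw [pvAgo]
      simp only [if_pos (rfl : (1 : Int) = 1)]
      congr 1
      split_ifs with h1 <;> simp [Prod.ext_iff] <;> omega
    rw [hstep]
    simp only [List.length_cons, Nat.cast_add, Nat.cast_one]
    have e1 : i + ((ys.length : Int) + 1) = (i + 1) + (ys.length : Int) := by ring
    have e2 : cnt + ((ys.length : Int) + 1) = (cnt + 1) + (ys.length : Int) := by ring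
    have e3 : max maxv ((cnt + 1) + (ys.length : Int))
        = max (max maxv (cnt + 1)) ((cnt + 1) + (ys.length : Int)) := by omega
    have e4 : (if (cnt + 1) + (ys.length : Int) > maxv then prev else idx)
        = (if (cnt + 1) + (ys.length : Int) > max maxv (cnt + 1) then prev
           else if cnt + 1 > maxv then prev else idx) := by
      split_ifs <;> first | rfl | (exfalso; omega)
    rw [e1, e2, e3, e4]
    exact ih rest (i + 1) (max maxv (cnt + 1)) _ (cnt + 1) prev
      (fun z hz => h z (by simp [hz])) (le_max_right _ _)

lemma pvZera_ones : ∀ (os rest : List Int) (i : Int),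
    (∀ y ∈ os, y = 1) → pvZera (os ++ rest) i = pvZera rest (i + os.length) := by
  intro os
  induction os with
  | nil => intro rest i _; simp
  | cons y ys ih =>
    intro rest i h
    have hy : y = 1 := h y (by simp)
    subst hy
    simp only [List.cons_append, pvZera]
    rw [if_neg (by simp), ih rest (i + 1) (fun z hz => h z (by simp [hz]))]
    congr 1
    simp only [List.length_cons]; push_cast; ring

lemma pvZera_head_ge : ∀ (xs : List Int) (i z : Int),
    (pvZera xs i).head? = some z → i ≤ z := by
  intro xs
  induction xs with
  | nil => intro i z h; simp [pvZera] at h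
  | cons x xs ih =>
    intro i z h
    by_cases hx : x = 1
    · simp only [pvZera, hx, ne_eq, not_true_eq_false, if_false] at h
      have := ih (i + 1) z h; omega
    · simp only [pvZera, if_pos hx, List.head?_cons, Option.some.injEq] at h
      omega

lemma pvZipFold_eq_altGo : ∀ (zs : List Int) (n prev b1 b2 : Int),
    ((((prev :: (zs ++ [n])).zip (zs ++ [n])).zip ((zs ++ [n]).drop 1)).foldl pvStepB (b1, b2))
      = pvAltGo n prev zs (b1, b2) := by
  intro zs
  induction zs with
  | nil =>
    intro n prev b1 b2
    simp [pvAltGo]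
  | cons z zs' ih =>
    intro n prev b1 b2
    cases zs' with
    | nil =>
      simp [pvAltGo, pvStepB]
    | cons z2 t =>
      have step : pvStepB (b1, b2) ((prev, z), z2)
          = (if z2 - prev - 1 > b1 then (z2 - prev - 1, z) else (b1, b2)) := rfl
      have h2 : ∀ c1 c2 : Int,
          List.foldl pvStepB (c1, c2)
              (((z :: (z2 :: (t ++ [n]))).zip (z2 :: (t ++ [n]))).zip (t ++ [n]))
            = pvAltGo n z (z2 :: t) (c1, c2) := by
        intro c1 c2
        have h := ih n z c1 c2
        simpa only [List.cons_append, List.drop_succ_cons, List.drop_zero] using h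
      simp only [List.cons_append, List.drop_succ_cons, List.drop_zero]
      rw [List.zip_cons_cons, List.zip_cons_cons, List.foldl_cons, step]
      by_cases h : z2 - prev - 1 > b1
      · rw [if_pos h, h2]
        simp [pvAltGo, h]
      · rw [if_neg h, h2]
        simp [pvAltGo, h]

lemma pvBlocks : ∀ (fuel : Nat) (xs : List Int) (i maxv idx cnt prev bl bz : Int),
    xs.length ≤ fuel →
    (∀ y, xs.head? = some y → y ≠ 1) →
    idx = bz → bl ≤ maxv →
    (bl < maxv → ∀ z zs', pvZera xs i = z :: zs' →
        maxv < zs'.head?.getD (i + xs.length) - prev - 1) →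
    (pvAgo xs i (maxv, idx, cnt, prev)).2.1
      = (pvAltGo (i + xs.length) prev (pvZera xs i) (bl, bz)).2 := by
  intro fuel
  induction fuel with
  | zero =>
    intro xs i maxv idx cnt prev bl bz hlen _ hidx _ _
    have hxs : xs = [] := List.length_eq_zero_iff.mp (Nat.le_zero.mp hlen)
    subst hxs
    simp [pvAgo, pvZera, pvAltGo, hidx]
  | succ f ih =>
    intro xs i maxv idx cnt prev bl bz hlen hhead hidx hble hinv
    cases xs with
    | nil => simp [pvAgo, pvZera, pvAltGo, hidx]
    | cons x rest =>
      have hx : x ≠ 1 := hhead x rfl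
      obtain ⟨os, xs2, hsplit, hos, hx2⟩ :
          ∃ os xs2, os ++ xs2 = rest ∧ (∀ y ∈ os, y = 1) ∧
            (∀ y, xs2.head? = some y → y ≠ 1) := by
        refine ⟨rest.takeWhile (fun y => y == 1), rest.dropWhile (fun y => y == 1),
          List.takeWhile_append_dropWhile, ?_, ?_⟩
        · intro y hy; simpa using List.mem_takeWhile_imp hy
        · intro y hy
          have hd := List.head?_dropWhile_not (fun y => y == 1) rest
          rw [hy] at hd; simpa using hd
      subst hsplit
      -- abbreviations
      have hstep1 : pvAgo (x :: (os ++ xs2)) i (maxv, idx, cnt, prev)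
          = pvAgo (os ++ xs2) (i + 1)
              (max maxv (i - prev), if i - prev > maxv then i else idx, i - prev, i) := by
        rw [pvAgo]
        simp only [if_neg hx]
        congr 1
        split_ifs with h1 <;> simp [Prod.ext_iff] <;> omega
      rw [hstep1, pvAgo_ones os xs2 (i + 1) _ _ _ _ hos (le_max_right _ _)]
      have hz : pvZera (x :: (os ++ xs2)) i = i :: pvZera xs2 (i + 1 + (os.length : Int)) := by
        rw [pvZera, if_pos hx, pvZera_ones os xs2 (i + 1) hos]
      rw [hz]
      -- arithmetic abbreviation
      have hlen1 : (((x :: (os ++ xs2)).length : Nat) : Int)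
          = 1 + (os.length : Int) + ((xs2.length : Nat) : Int) := by
        push_cast [List.length_cons, List.length_append]; ring
      -- normalise A's state after the ones run
      have hA2 : (max (max maxv (i - prev)) ((i - prev) + (os.length : Int)),
            (if (i - prev) + ((os.length : Nat) : Int) > max maxv (i - prev) then i
             else if i - prev > maxv then i else idx),
            (i - prev) + (os.length : Int), i)
          = (max maxv ((i - prev) + (os.length : Int)),
             (if (i - prev) + (os.length : Int) > maxv then i else idx),
             (i - prev) + (os.length : Int), i) := by
        have h1 : max (max maxv (i - prev)) ((i - prev) + (os.length : Int))
            = max maxv ((i - prev) + (os.length : Int)) := by omega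
        have h2 : (if (i - prev) + ((os.length : Nat) : Int) > max maxv (i - prev) then i
              else if i - prev > maxv then i else idx)
            = (if (i - prev) + (os.length : Int) > maxv then i else idx) := by
          split_ifs <;> first | rfl | (exfalso; omega)
        rw [h1, h2]
      rw [hA2]
      cases hxs2 : xs2 with
      | nil =>
        subst hxs2
        simp only [pvZera, pvAgo]
        have hdl : i + (((x :: (os ++ ([] : List Int))).length : Nat) : Int) - prev - 1
            = (i - prev) + (os.length : Int) := by
          rw [hlen1]; push_cast [List.length_nil]; ring
        rw [show pvAltGo (i + (((x :: (os ++ ([] : List Int))).length : Nat) : Int)) prev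
              (i :: ([] : List Int)) (bl, bz)
            = (if (i - prev) + (os.length : Int) > bl
                then ((i - prev) + (os.length : Int), i) else (bl, bz)) from by
          simp only [pvAltGo]
          rw [show i + (((x :: (os ++ ([] : List Int))).length : Nat) : Int) - prev - 1
              = (i - prev) + (os.length : Int) from hdl]]
        have hinv' : bl < maxv → maxv < (i - prev) + (os.length : Int) := by
          intro hlt
          have h5 := hinv hlt i [] (by rw [hz]; simp [pvZera])
          simp only [List.head?_nil, Option.getD_none] at h5
          rw [hlen1] at h5
          push_cast [List.length_nil] at h5
          omega
        rcases eq_or_lt_of_le hble with he | hlt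
        · subst he
          split_ifs with h1 <;> simp [hidx]
        · have hmd := hinv' hlt
          rw [if_pos (by omega), if_pos (by omega)]
      | cons y tail =>
        have hy : y ≠ 1 := hx2 y (by rw [hxs2]; rfl)
        subst hxs2
        have hz2 : pvZera (y :: tail) (i + 1 + (os.length : Int))
            = (i + 1 + (os.length : Int)) :: pvZera tail (i + 1 + (os.length : Int) + 1) := by
          rw [pvZera, if_pos hy]
        rw [hz2]
        -- B's first step
        have hdl : i + 1 + (os.length : Int) - prev - 1 = (i - prev) + (os.length : Int) := by ring
        have hBstep : pvAltGo (i + (((x :: (os ++ y :: tail)).length : Nat) : Int)) prev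
              ((i :: (i + 1 + (os.length : Int)) :: pvZera tail (i + 1 + (os.length : Int) + 1)))
              (bl, bz)
            = pvAltGo (i + (((x :: (os ++ y :: tail)).length : Nat) : Int)) i
              ((i + 1 + (os.length : Int)) :: pvZera tail (i + 1 + (os.length : Int) + 1))
              (if (i - prev) + (os.length : Int) > bl
               then ((i - prev) + (os.length : Int), i) else (bl, bz)) := by
          rw [pvAltGo]
          rw [show i + 1 + (os.length : Int) - prev - 1 = (i - prev) + (os.length : Int) from hdl]
        rw [hBstep]
        -- the new best pair equals A's new (max, idx) pair
        have hinv' : bl < maxv → maxv < (i - prev) + (os.length : Int) := by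
          intro hlt
          have := hinv hlt i ((i + 1 + (os.length : Int)) :: pvZera tail (i + 1 + (os.length : Int) + 1))
            (by rw [← hz2, ← hz])
          simpa [hdl] using this
        have hkey : (if (i - prev) + (os.length : Int) > bl
              then (((i - prev) + (os.length : Int), i) : Int × Int) else (bl, bz))
            = (max maxv ((i - prev) + (os.length : Int)),
               if (i - prev) + (os.length : Int) > maxv then i else idx) := by
          rcases eq_or_lt_of_le hble with he | hlt
          · subst he
            split_ifs with h1 <;> simp [Prod.ext_iff, hidx] <;> omega
          · have hmd := hinv' hlt
            rw [if_pos (by omega : (i - prev) + (os.length : Int) > bl),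
              if_pos (by omega : (i - prev) + (os.length : Int) > maxv),
              show max maxv ((i - prev) + (os.length : Int)) = (i - prev) + (os.length : Int)
                from by omega]
        rw [hkey]
        -- apply the induction hypothesis at the next zero block
        have hn : i + (((x :: (os ++ y :: tail)).length : Nat) : Int)
            = (i + 1 + (os.length : Int)) + (((y :: tail).length : Nat) : Int) := by
          push_cast [List.length_cons, List.length_append]; ring
        rw [hn, ← hz2]
        refine ih (y :: tail) (i + 1 + (os.length : Int)) (max maxv ((i - prev) + (os.length : Int)))
          (if (i - prev) + (os.length : Int) > maxv then i else idx)
          ((i - prev) + (os.length : Int)) i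
          (max maxv ((i - prev) + (os.length : Int)))
          (if (i - prev) + (os.length : Int) > maxv then i else idx)
          ?_ hx2 rfl le_rfl ?_
        · have := hlen
          simp only [List.length_cons, List.length_append] at this ⊢
          omega
        · intro hcon
          exact absurd hcon (lt_irrefl _)

-- ===== VERDICT (by name: the statement is the Claim_ definition above) =====
theorem znajdzZeroDoPodmianyV1_spec : Claim_equal_znajdzZeroDoPodmianyV1 := by
  intro lista _
  unfold Spec_znajdzZeroDoPodmianyV1
  have hA : znajdzZeroDoPodmianyV1 lista = (pvAgo lista 0 (0, -1, 0, -1)).2.1 := by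
    unfold znajdzZeroDoPodmianyV1
    have h := pvAgo_bridge lista [] (0, -1, 0, -1)
    simp only [List.nil_append, List.length_nil, Nat.cast_zero, zero_add] at h
    rw [PySem.List.len_eq, h]
  obtain ⟨os, xs0, hsplit, hos, hx0⟩ :
      ∃ os xs0, os ++ xs0 = lista ∧ (∀ y ∈ os, y = 1) ∧ (∀ y, xs0.head? = some y → y ≠ 1) := by
    refine ⟨lista.takeWhile (fun y => y == 1), lista.dropWhile (fun y => y == 1),
      List.takeWhile_append_dropWhile, ?_, ?_⟩
    · intro y hy; simpa using List.mem_takeWhile_imp hy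
    · intro y hy
      have hd := List.head?_dropWhile_not (fun y => y == 1) lista
      rw [hy] at hd; simpa using hd
  subst hsplit
  rw [hA, pvAgo_ones os xs0 0 0 (-1) 0 (-1) hos le_rfl]
  cases xs0 with
  | nil =>
    rw [show znajdzZeroDoPodmianyV1_alt (os ++ []) = -1 from by
      unfold znajdzZeroDoPodmianyV1_alt
      rw [pvZera_ones os [] 0 hos]
      simp [pvZera]]
    simp [pvAgo]
  | cons y t =>
    have hy : y ≠ 1 := hx0 y rfl
    have hzera : pvZera (os ++ y :: t) 0
        = (0 + (os.length : Int)) :: pvZera t (0 + (os.length : Int) + 1) := by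
      rw [pvZera_ones os (y :: t) 0 hos, pvZera, if_pos hy]
    have hn2 : (((os ++ y :: t).length : Nat) : Int)
        = (0 + (os.length : Int)) + (((y :: t).length : Nat) : Int) := by
      push_cast [List.length_append, List.length_cons]; ring
    have hB : znajdzZeroDoPodmianyV1_alt (os ++ y :: t)
        = (pvAltGo ((0 + (os.length : Int)) + (((y :: t).length : Nat) : Int)) (-1)
            (pvZera (y :: t) (0 + (os.length : Int))) (0, -1)).2 := by
      unfold znajdzZeroDoPodmianyV1_alt pvPetla
      rw [PySem.List.len_eq, hzera, hn2]
      rw [if_neg (by simp)]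
      rw [show ∀ (a : Int) (l : List Int), (a :: l).drop 1 = l from fun _ _ => rfl,
        show ∀ (a : Int) (l : List Int), (a :: l).drop 2 = l.drop 1 from fun _ _ => rfl]
      rw [pvZipFold_eq_altGo ((0 + (os.length : Int)) :: pvZera t (0 + (os.length : Int) + 1))
        ((0 + (os.length : Int)) + (((y :: t).length : Nat) : Int)) (-1) 0 (-1)]
      rw [show pvZera (y :: t) (0 + (os.length : Int))
          = (0 + (os.length : Int)) :: pvZera t (0 + (os.length : Int) + 1) from by
        rw [pvZera, if_pos hy]]
    rw [hB]
    refine pvBlocks ((y :: t).length) (y :: t) (0 + (os.length : Int))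
      (max 0 (0 + (os.length : Int)))
      (if 0 + ((os.length : Nat) : Int) > 0 then (-1 : Int) else (-1 : Int))
      (0 + (os.length : Int)) (-1) 0 (-1) le_rfl hx0 (ite_self _) (le_max_left _ _) ?_
    intro hlt z zs' hzz
    rw [pvZera, if_pos hy] at hzz
    injection hzz with h1 h2
    subst h2
    cases hh : (pvZera t (0 + (os.length : Int) + 1)).head? with
    | none =>
      simp only [Option.getD_none]
      push_cast [List.length_cons]
      omega
    | some w =>
      have hw := pvZera_head_ge t (0 + (os.length : Int) + 1) w hh
      simp only [Option.getD_some]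
      omega
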